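-- pv_equiv track=rewrite | github.com/L1ghtYagam1/osTicket_MAX_bot_miniapp | main.py | build_buttons
-- ===== SOURCE A (Python) =====
-- def build_buttons(options: list[tuple[str, str]]) -> list[list[dict[str, str]]]:
--     rows: list[list[dict[str, str]]] = []
--     row: list[dict[str, str]] = []
--     for index, (text, payload) in enumerate(options, start=1):
--         row.append({"type": "callback", "text": text, "payload": payload})
--         if index % 2 == 0:
--             rows.append(row)
--             row = []
--     if row:
--         rows.append(row)
--     return rows
-- ===== SOURCE B (Python) =====
-- def build_buttons(options: list[tuple[str, str]]) -> list[list[dict[str, str]]]: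
--     return [
--         [{"type": "callback", "text": text, "payload": payload}
--          for (text, payload) in options[i:i + 2]]
--         for i in range(0, len(options), 2)
--     ]
-- ===== Notes on version B (the rewrite author's own statement) =====
-- stated objective: simpler
-- what changed: Replaces the running row accumulator with enumerate counter, modulo-2 flush and trailing 'if row' guard by a single comprehension over start indices range(0, len, 2) that slices each two-element chunk directly.
import Mathlib
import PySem

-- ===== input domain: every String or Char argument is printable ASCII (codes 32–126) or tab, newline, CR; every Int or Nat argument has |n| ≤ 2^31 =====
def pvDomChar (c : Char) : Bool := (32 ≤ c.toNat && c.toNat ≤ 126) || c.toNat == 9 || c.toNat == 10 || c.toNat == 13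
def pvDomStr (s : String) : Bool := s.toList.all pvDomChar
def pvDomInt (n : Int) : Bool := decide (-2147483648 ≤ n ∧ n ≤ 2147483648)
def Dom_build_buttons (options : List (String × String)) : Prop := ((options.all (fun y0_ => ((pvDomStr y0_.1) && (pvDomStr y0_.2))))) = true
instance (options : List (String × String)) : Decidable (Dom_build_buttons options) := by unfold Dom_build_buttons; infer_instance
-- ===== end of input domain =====

-- B replaces A's running row accumulator, enumerate counter, modulo-2 flush and trailing
-- 'if row' guard by a comprehension over start indices range(0, len, 2) with slicing (simpler).


-- ===== PORT A =====
-- literal port of A: fold over enumerate(options, start=1) with (rows, row) state,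
-- flushing when index % 2 == 0, then appending a nonempty leftover row
def build_buttons (options : List (String × String)) : List (List (List (String × String))) :=
  let st := (PySem.List.enumerate options 1).foldl
    (fun (st : List (List (List (String × String))) × List (List (String × String))) ip =>
      let row := st.2 ++ [[("type", "callback"), ("text", ip.2.1), ("payload", ip.2.2)]]
      if PySem.Int.mod ip.1 2 == 0 then (st.1 ++ [row], []) else (st.1, row))
    ([], [])
  if st.2 ≠ [] then st.1 ++ [st.2] else st.1

-- ===== PORT B =====
-- literal port of B: map over range(0, len(options), 2), slicing options[i:i+2]
def build_buttons_alt (options : List (String × String)) : List (List (List (String × String))) :=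
  (PySem.List.pyRange 0 (options.length : Int) 2).map (fun i =>
    (PySem.List.slice options (some i) (some (i + 2))).map
      (fun tp => [("type", "callback"), ("text", tp.1), ("payload", tp.2)]))

-- ===== PRECONDITION & SPEC =====
def Spec_build_buttons (options : List (String × String)) (out : List (List (List (String × String)))) : Prop := out = build_buttons_alt options
instance (options : List (String × String)) (out : List (List (List (String × String)))) : Decidable (Spec_build_buttons options out) := by unfold Spec_build_buttons; infer_instance

-- ===== CLAIM (what is proved, stated in full; the proofs are below) =====
def Claim_equal_build_buttons : Prop := ∀ (options : List (String × String)), Dom_build_buttons options → Spec_build_buttons options (build_buttons options)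

-- ===== LEMMAS AND PROOFS =====

def pvBtn (tp : String × String) : List (String × String) :=
  [("type", "callback"), ("text", tp.1), ("payload", tp.2)]

-- the pairing into rows of two that both programs compute
def pvChunks : List (String × String) → List (List (List (String × String)))
  | [] => []
  | [x] => [[pvBtn x]]
  | x :: y :: r => [pvBtn x, pvBtn y] :: pvChunks r

-- A's loop body and final flush, named so the loop lemma can speak about them
def pvStep (st : List (List (List (String × String))) × List (List (String × String)))
    (ip : Int × (String × String)) :
    List (List (List (String × String))) × List (List (String × String)) :=
  let row := st.2 ++ [[("type", "callback"), ("text", ip.2.1), ("payload", ip.2.2)]]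
  if PySem.Int.mod ip.1 2 == 0 then (st.1 ++ [row], []) else (st.1, row)

def pvFinish (st : List (List (List (String × String))) × List (List (String × String))) :
    List (List (List (String × String))) :=
  if st.2 ≠ [] then st.1 ++ [st.2] else st.1

lemma pvA_unfold (options : List (String × String)) :
    build_buttons options = pvFinish ((PySem.List.enumerate options 1).foldl pvStep ([], [])) := rfl

lemma pvMod_add_two (s : Int) (h : PySem.Int.mod s 2 = 1) : PySem.Int.mod (s + 2) 2 = 1 := by
  rw [PySem.Int.mod_eq_emod_of_pos (by norm_num)] at h ⊢; omega

-- A's loop, started at an odd index with an empty current row, appends pvChunks to rows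
lemma pvA_loop (xs : List (String × String)) :
    ∀ (rows : List (List (List (String × String)))) (s : Int), PySem.Int.mod s 2 = 1 →
    pvFinish ((PySem.List.enumerate xs s).foldl pvStep (rows, [])) = rows ++ pvChunks xs := by
  induction xs using pvChunks.induct with
  | case1 =>
    intro rows s _
    simp [PySem.List.enumerate_nil, pvFinish, pvChunks]
  | case2 x =>
    intro rows s hs
    have hs' : s % 2 = 1 := by
      rw [PySem.Int.mod_eq_emod_of_pos (by norm_num)] at hs; exact hs
    have st1 : pvStep (rows, []) (s, x) = (rows, [pvBtn x]) := by
      simp [pvStep, pvBtn, hs']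
    simp [PySem.List.enumerate_cons, PySem.List.enumerate_nil, st1, pvFinish, pvChunks]
  | case3 x y r ih =>
    intro rows s hs
    have hs' : s % 2 = 1 := by
      rw [PySem.Int.mod_eq_emod_of_pos (by norm_num)] at hs; exact hs
    have hdvd : (2 : Int) ∣ s + 1 := by omega
    have st1 : pvStep (rows, []) (s, x) = (rows, [pvBtn x]) := by
      simp [pvStep, pvBtn, hs']
    have st2 : pvStep (rows, [pvBtn x]) (s + 1, y) = (rows ++ [[pvBtn x, pvBtn y]], []) := by
      simp [pvStep, pvBtn, hdvd]
    rw [PySem.List.enumerate_cons, PySem.List.enumerate_cons, List.foldl_cons, List.foldl_cons,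
        st1, st2, show s + 1 + 1 = s + 2 by ring,
        ih (rows ++ [[pvBtn x, pvBtn y]]) (s + 2) (pvMod_add_two s hs)]
    simp [pvChunks]

-- range(a+c, b+c, 2) is range(a, b, 2) shifted by c
lemma pvRange_shift (a b c : Int) :
    PySem.List.pyRange (a + c) (b + c) 2 = (PySem.List.pyRange a b 2).map (· + c) := by
  rw [PySem.List.pyRange_of_pos _ _ (by norm_num), PySem.List.pyRange_of_pos _ _ (by norm_num)]
  have h1 : (a + c < b + c) = (a < b) := by
    apply propext; omega
  simp only [h1, show b + c - (a + c) = b - a by ring, List.map_map]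
  exact List.map_congr_left (fun k _ => by simp; ring)

-- peel the first start index off a step-2 range
lemma pvRange_two_cons (a b : Int) (h : a < b) :
    PySem.List.pyRange a b 2 = a :: PySem.List.pyRange (a + 2) b 2 := by
  rw [PySem.List.pyRange_of_pos _ _ (by norm_num : (0:Int) < 2),
      PySem.List.pyRange_of_pos _ _ (by norm_num : (0:Int) < 2)]
  have hcount : ((b - a + 2 - 1) / 2).toNat
      = (if a + 2 < b then ((b - (a + 2) + 2 - 1) / 2).toNat else 0) + 1 := by
    split_ifs with h2 <;> omega
  rw [if_pos h, hcount, List.range_succ_eq_map, List.map_cons, List.map_map]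
  congr 1
  · ring
  · exact List.map_congr_left (fun k _ => by simp; ring)

-- B computes pvChunks
lemma pvB_eq_chunks (xs : List (String × String)) : build_buttons_alt xs = pvChunks xs := by
  induction xs using pvChunks.induct with
  | case1 =>
    simp [build_buttons_alt, pvChunks, PySem.List.pyRange]
  | case2 x =>
    unfold build_buttons_alt
    rw [show (([x] : List (String × String)).length : Int) = 1 by simp,
        show PySem.List.pyRange 0 1 2 = [0] by decide, List.map_cons, List.map_nil,
        PySem.List.slice_toNat _ (by norm_num) (by norm_num)]
    simp [pvChunks, pvBtn]
  | case3 x y r ih =>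
    unfold build_buttons_alt
    rw [show ((x :: y :: r).length : Int) = (r.length : Int) + 2 by simp; ring,
        pvRange_two_cons 0 ((r.length : Int) + 2) (by positivity),
        List.map_cons, pvRange_shift 0 (r.length : Int) 2, List.map_map]
    have hhead : (PySem.List.slice (x :: y :: r) (some 0) (some (0 + 2))).map
        (fun tp => [("type", "callback"), ("text", tp.1), ("payload", tp.2)])
        = [pvBtn x, pvBtn y] := by
      rw [PySem.List.slice_toNat _ (by norm_num) (by norm_num)]
      simp [pvBtn]
    have htail : ∀ i ∈ PySem.List.pyRange 0 (r.length : Int) 2,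
        ((fun i => (PySem.List.slice (x :: y :: r) (some i) (some (i + 2))).map
          (fun tp => [("type", "callback"), ("text", tp.1), ("payload", tp.2)])) ∘ (· + 2)) i
        = (PySem.List.slice r (some i) (some (i + 2))).map
          (fun tp => [("type", "callback"), ("text", tp.1), ("payload", tp.2)]) := by
      intro i hi
      have hi0 : 0 ≤ i := ((PySem.List.mem_pyRange_iff_of_pos (by norm_num) i).mp hi).1
      simp only [Function.comp_apply]
      rw [PySem.List.slice_toNat _ (by omega) (by omega),
          PySem.List.slice_toNat _ (by omega) (by omega)]
      have h1 : (i + 2).toNat = i.toNat + 2 := by omega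
      have h2 : (i + 2 + 2).toNat - (i + 2).toNat = (i + 2).toNat - i.toNat := by omega
      rw [h2, h1]
      simp
    rw [hhead, List.map_congr_left htail]
    unfold build_buttons_alt at ih
    rw [ih, pvChunks]

-- ===== VERDICT (by name: the statement is the Claim_ definition above) =====
theorem build_buttons_spec : Claim_equal_build_buttons := by
  intro options _
  show build_buttons options = build_buttons_alt options
  rw [pvB_eq_chunks, pvA_unfold]
  simpa using pvA_loop options [] 1 (by decide)
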